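-- pv_equiv track=rewrite | github.com/MrHamdulay/csc3-capstone | examples/data/Assignment_8/elnrae001/question3.py | convert
-- ===== SOURCE A (Python) =====
-- def convert(string):
--     if string!=string.upper(): # gives codeword if string is not in capitals
--         if string=='':
--             return string
--         elif chr(ord(string[0])+1)=='!': # if scharacter is a space
--             return ' '+convert(string[1:])
--         elif chr(ord(string[0])+1)=='{': # if character is z
--             return 'a' +convert(string[1:])
--         elif chr(ord(string[0])+1)=='/': # if character is '.'
--                 return '.' +convert(string[1:])
--         else:
--             return chr(ord(string[0])+1) +convert(string[1:])
--     else: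
--         return string
-- ===== SOURCE B (Python) =====
-- def _shift(c):
--     if c == ' ':
--         return ' '
--     if c == 'z':
--         return 'a'
--     if c == '.':
--         return '.'
--     return chr(ord(c) + 1)
--
-- def convert(string):
--     cut = 0
--     for i, c in enumerate(string):
--         if 'a' <= c <= 'z':
--             cut = i + 1
--     return ''.join(_shift(c) for c in string[:cut]) + string[cut:]
-- ===== Notes on version B (the rewrite author's own statement) =====
-- stated objective: faster
-- what changed: A rescans the whole remaining suffix with string.upper() at every recursive step (quadratic); B makes one pass to find the end of the region containing lowercase letters (index after the last lowercase letter) and then shifts exactly the prefix up to it, appending the rest unchanged.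
import Mathlib
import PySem

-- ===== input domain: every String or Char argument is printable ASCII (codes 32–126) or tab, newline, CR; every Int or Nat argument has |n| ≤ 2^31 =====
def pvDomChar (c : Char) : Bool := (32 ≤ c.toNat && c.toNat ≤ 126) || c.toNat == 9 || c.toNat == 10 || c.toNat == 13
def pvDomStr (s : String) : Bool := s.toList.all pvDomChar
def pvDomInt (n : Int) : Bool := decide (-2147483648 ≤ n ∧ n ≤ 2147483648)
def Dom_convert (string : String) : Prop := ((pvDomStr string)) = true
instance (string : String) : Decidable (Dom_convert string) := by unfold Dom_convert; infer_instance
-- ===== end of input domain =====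

-- B replaces A's quadratic recursion (a full `upper` scan of the suffix at every step)
-- by one pass that finds the end of the region to shift and maps the shift over it; speed-up asymptotic.

-- ===== PORT A =====
-- literal transliteration of A's recursion on the character list
def convertList (s : List Char) : List Char :=
  if s ≠ PySem.Chars.upper s then
    match s with
    | [] => []
    | c :: rest =>
      if Char.ofNat (c.toNat + 1) = '!' then ' ' :: convertList rest
      else if Char.ofNat (c.toNat + 1) = '{' then 'a' :: convertList rest
      else if Char.ofNat (c.toNat + 1) = '/' then '.' :: convertList rest
      else Char.ofNat (c.toNat + 1) :: convertList rest
  else s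
termination_by s.length
decreasing_by all_goals simp

def convert (string : String) : String := String.mk (convertList string.toList)

-- ===== PORT B =====
def shiftChar (c : Char) : Char :=
  if c = ' ' then ' '
  else if c = 'z' then 'a'
  else if c = '.' then '.'
  else Char.ofNat (c.toNat + 1)

def convert_alt (string : String) : String :=
  let l := string.toList
  let cut : Int := (PySem.List.enumerate l).foldl
    (fun cut ic => if 'a' ≤ ic.2 ∧ ic.2 ≤ 'z' then ic.1 + 1 else cut) 0
  String.mk ((PySem.List.slice l none (some cut)).map shiftChar ++ PySem.List.slice l (some cut) none)

-- ===== PRECONDITION & SPEC =====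
def Spec_convert (string : String) (out : String) : Prop := out = convert_alt string
instance (string : String) (out : String) : Decidable (Spec_convert string out) := by unfold Spec_convert; infer_instance

-- ===== CLAIM (what is proved, stated in full; the proofs are below) =====
def Claim_equal_convert : Prop := ∀ (string : String), Dom_convert string → Spec_convert string (convert string)

-- ===== LEMMAS AND PROOFS =====

-- 1 + index of the last lowercase letter (0 if none): recursive characterisation of B's `cut`
def cutRec : List Char → Nat
  | [] => 0
  | c :: r => if cutRec r = 0 then (if PySem.Chars.islower c then 1 else 0) else cutRec r + 1

theorem cutRec_eq_zero_iff (l : List Char) :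
    cutRec l = 0 ↔ ∀ c ∈ l, PySem.Chars.islower c = false := by
  induction l with
  | nil => simp [cutRec]
  | cons c r ih =>
    simp only [cutRec, List.mem_cons, forall_eq_or_imp, ← ih]
    by_cases h0 : cutRec r = 0 <;> by_cases hl : PySem.Chars.islower c = true <;>
      simp [h0, hl]

theorem foldl_enum_cut (l : List Char) (s a : Int) :
    (PySem.List.enumerate l s).foldl
      (fun cut ic => if 'a' ≤ ic.2 ∧ ic.2 ≤ 'z' then ic.1 + 1 else cut) a
      = if cutRec l = 0 then a else s + cutRec l := by
  induction l generalizing s a with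
  | nil => simp [PySem.List.enumerate_nil, cutRec]
  | cons c r ih =>
    rw [PySem.List.enumerate_cons, List.foldl_cons, ih]
    simp only [cutRec, PySem.Chars.islower]
    by_cases hl : 'a' ≤ c ∧ c ≤ 'z'
    · by_cases h0 : cutRec r = 0 <;> simp [hl, h0] <;> push_cast <;> ring
    · by_cases h0 : cutRec r = 0 <;> simp [hl, h0] <;> push_cast <;> ring

theorem char_toNat_inj {c d : Char} (h : c.toNat = d.toNat) : c = d := by
  unfold Char.toNat at h
  exact Char.ext (UInt32.toNat_inj.mp h)

theorem le_char_iff_toNat {c d : Char} : c ≤ d ↔ c.toNat ≤ d.toNat := by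
  exact ⟨fun h => h, fun h => h⟩

theorem upperChar_eq_self_iff (c : Char) :
    PySem.Chars.upperChar c = c ↔ PySem.Chars.islower c = false := by
  unfold PySem.Chars.upperChar
  split_ifs with h
  · simp only [h, iff_false, Bool.true_eq_false]
    intro heq
    have hlo : 97 ≤ c.toNat ∧ c.toNat ≤ 122 := by
      unfold PySem.Chars.islower at h
      simp only [Bool.and_eq_true, decide_eq_true_eq] at h
      exact ⟨le_char_iff_toNat.mp h.1, le_char_iff_toNat.mp h.2⟩
    have := congrArg Char.toNat heq
    rw [Char.toNat_ofNat] at this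
    have hv : (c.toNat - 32).isValidChar := by
      unfold Nat.isValidChar; omega
    rw [if_pos hv] at this
    omega
  · simp [h]

theorem upper_eq_self_iff (l : List Char) :
    PySem.Chars.upper l = l ↔ ∀ c ∈ l, PySem.Chars.islower c = false := by
  unfold PySem.Chars.upper
  induction l with
  | nil => simp
  | cons c r ih =>
    simp only [List.map_cons, List.cons.injEq, List.mem_cons, ih]
    constructor
    · rintro ⟨h1, h2⟩ c2 hc2
      rcases hc2 with h | h
      · subst h; exact (upperChar_eq_self_iff c2).mp h1
      · exact h2 c2 h
    · intro h
      exact ⟨(upperChar_eq_self_iff c).mpr (h c (Or.inl rfl)),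
             fun c2 hc2 => h c2 (Or.inr hc2)⟩

theorem convertList_of_cut_zero (l : List Char) (h : cutRec l = 0) : convertList l = l := by
  have hu : PySem.Chars.upper l = l := (upper_eq_self_iff l).mpr ((cutRec_eq_zero_iff l).mp h)
  unfold convertList
  cases l <;> simp [hu]

theorem dom_toNat {c : Char} (hd : pvDomChar c = true) : c.toNat + 1 ≤ 127 := by
  unfold pvDomChar at hd
  simp only [Bool.or_eq_true, Bool.and_eq_true, decide_eq_true_eq, beq_iff_eq] at hd
  omega

theorem ofNat_succ_eq_iff {c d : Char} (hd : pvDomChar c = true) (hdn : d.toNat < 128) :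
    Char.ofNat (c.toNat + 1) = d ↔ c.toNat + 1 = d.toNat := by
  have hv : (c.toNat + 1).isValidChar := by
    unfold Nat.isValidChar; have := dom_toNat hd; omega
  constructor
  · intro h
    have := congrArg Char.toNat h
    rwa [Char.toNat_ofNat, if_pos hv] at this
  · intro h
    apply char_toNat_inj
    rw [Char.toNat_ofNat, if_pos hv]; exact h

theorem branch_eq_shiftChar (c : Char) (hd : pvDomChar c = true) (t : List Char) :
    (if Char.ofNat (c.toNat + 1) = '!' then ' ' :: t
     else if Char.ofNat (c.toNat + 1) = '{' then 'a' :: t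
     else if Char.ofNat (c.toNat + 1) = '/' then '.' :: t
     else Char.ofNat (c.toNat + 1) :: t) = shiftChar c :: t := by
  have h1 : (Char.ofNat (c.toNat + 1) = '!') ↔ (c = ' ') := by
    rw [ofNat_succ_eq_iff hd (by decide)]
    constructor
    · intro h; exact char_toNat_inj (by simpa using h)
    · intro h; subst h; decide
  have h2 : (Char.ofNat (c.toNat + 1) = '{') ↔ (c = 'z') := by
    rw [ofNat_succ_eq_iff hd (by decide)]
    constructor
    · intro h; exact char_toNat_inj (by simpa using h)
    · intro h; subst h; decide
  have h3 : (Char.ofNat (c.toNat + 1) = '/') ↔ (c = '.') := by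
    rw [ofNat_succ_eq_iff hd (by decide)]
    constructor
    · intro h; exact char_toNat_inj (by simpa using h)
    · intro h; subst h; decide
  simp only [h1, h2, h3, shiftChar]
  by_cases e1 : c = ' '
  · subst e1; simp
  · by_cases e2 : c = 'z'
    · subst e2; simp
    · by_cases e3 : c = '.'
      · subst e3; simp
      · simp [e1, e2, e3]

theorem convertList_eq (l : List Char) (hd : ∀ c ∈ l, pvDomChar c = true) :
    convertList l = (l.take (cutRec l)).map shiftChar ++ l.drop (cutRec l) := by
  induction l with
  | nil => simp [convertList]
  | cons c r ih =>
    by_cases h0 : cutRec (c :: r) = 0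
    · rw [convertList_of_cut_zero _ h0, h0]; simp
    · have hne : (c :: r) ≠ PySem.Chars.upper (c :: r) := by
        intro h
        exact h0 ((cutRec_eq_zero_iff _).mpr ((upper_eq_self_iff _).mp h.symm))
      rw [convertList, if_pos hne]
      rw [branch_eq_shiftChar c (hd c (List.mem_cons_self)) _]
      by_cases hr : cutRec r = 0
      · have hl : PySem.Chars.islower c = true := by
          by_contra h
          simp only [Bool.not_eq_true] at h
          exact h0 (by simp [cutRec, hr, h])
        have hc1 : cutRec (c :: r) = 1 := by simp [cutRec, hr, hl]
        rw [hc1, convertList_of_cut_zero r hr]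
        simp
      · have hc1 : cutRec (c :: r) = cutRec r + 1 := by simp [cutRec, hr]
        rw [hc1, ih (fun c' hc' => hd c' (List.mem_cons_of_mem _ hc'))]
        simp

-- ===== VERDICT (by name: the statement is the Claim_ definition above) =====
theorem convert_spec : Claim_equal_convert := by
  intro string hdom
  unfold Spec_convert convert convert_alt
  have hd : ∀ c ∈ string.toList, pvDomChar c = true := by
    unfold Dom_convert pvDomStr at hdom
    exact List.all_eq_true.mp hdom
  set l := string.toList with hl
  have hcut : (PySem.List.enumerate l).foldl
      (fun cut ic => if 'a' ≤ ic.2 ∧ ic.2 ≤ 'z' then ic.1 + 1 else cut) 0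
      = (cutRec l : Int) := by
    rw [foldl_enum_cut]
    by_cases h0 : cutRec l = 0 <;> simp [h0]
  simp only [hcut]
  rw [PySem.List.slice_to l (by positivity), PySem.List.slice_from l (by positivity)]
  simp only [Int.toNat_natCast]
  rw [convertList_eq l hd]
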